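-- pv_equiv track=rewrite | github.com/Ag3497120/verantyx-v6 | arc/world_commands.py | draw_border
-- ===== SOURCE A (Python) =====
-- from collections import Counter, defaultdict
--
-- def _bg(g):
--     c = Counter()
--     for row in g: c.update(row)
--     return c.most_common(1)[0][0]
--
-- def _copy(g):
--     return [row[:] for row in g]
--
-- def _color_counts(g):
--     c = Counter()
--     for row in g: c.update(row)
--     return c
--
-- def draw_border(g):
--     """グリッドの外枠を最頻非bg色で描画"""
--     bg=_bg(g); h,w=len(g),len(g[0])
--     cc=_color_counts(g); del cc[bg]
--     if not cc: return g
--     col=cc.most_common(1)[0][0]; res=_copy(g)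
--     for r in range(h):
--         res[r][0]=col; res[r][w-1]=col
--     for c in range(w):
--         res[0][c]=col; res[h-1][c]=col
--     return res
-- ===== SOURCE B (Python) =====
-- def _best(items, exclude):
--     # running argmax: first key with the strictly largest count, skipping `exclude`
--     best, bc = None, -1
--     for k, c in items:
--         if k != exclude and c > bc:
--             best, bc = k, c
--     return best, bc
--
-- def draw_border(g):
--     """グリッドの外枠を最頻非bg色で描画"""
--     counts = {}
--     for row in g:
--         for x in row:
--             counts[x] = counts.get(x, 0) + 1
--     bg, _ = _best(counts.items(), None)
--     if len(counts) == 1: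
--         return g
--     col, _ = _best(counts.items(), bg)
--     h, w = len(g), len(g[0])
--     top = [col] * w
--     if h == 1:
--         return [top]
--     if w == 1:
--         return [[col] for _ in g]
--     mid = [[col] + row[1:-1] + [col] for row in g[1:-1]]
--     return [top] + mid + [top[:]]
-- ===== Notes on version B (the rewrite author's own statement) =====
-- stated objective: alternative
-- what changed: B replaces Counter/most_common selection by a plain dict counting loop plus a running-argmax helper (first key with strictly largest count, optionally skipping bg), and replaces A's copy-then-mutate edge loops by assembling the result as border row + slice-built middle rows + border row.
-- outside the precondition, e.g. on draw_border([[1, 2], [3, 4, 5]]): A returns [[2, 2], [2, 2, 5]], B returns [[2, 2], [2, 2]]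
import Mathlib
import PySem

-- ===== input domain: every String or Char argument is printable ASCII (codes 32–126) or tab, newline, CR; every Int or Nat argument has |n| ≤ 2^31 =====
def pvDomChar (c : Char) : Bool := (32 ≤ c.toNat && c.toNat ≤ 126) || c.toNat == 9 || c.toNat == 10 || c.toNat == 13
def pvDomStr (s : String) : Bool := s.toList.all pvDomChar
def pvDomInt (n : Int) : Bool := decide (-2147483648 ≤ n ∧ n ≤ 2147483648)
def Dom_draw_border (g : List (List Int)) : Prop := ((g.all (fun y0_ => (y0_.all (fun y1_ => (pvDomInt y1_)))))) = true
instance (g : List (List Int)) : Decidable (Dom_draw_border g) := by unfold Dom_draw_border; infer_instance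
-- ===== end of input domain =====

-- B selects bg and the border color with a plain dict counting loop plus a running-argmax scan
-- (first key of strictly largest count, optionally skipping bg) instead of Counter.most_common,
-- and assembles the result as border row + slice-built middle rows + border row instead of A's
-- copy-then-mutate edge loops; same O(h*w) cost (objective: alternative).

-- ===== PORT A =====
-- shared shape of Counter.most_common(1)[0][0]: most_common sorts stably by descending count,
-- so the first entry is the FIRST item of maximal count in insertion order, i.e. PySem.List.max?.
-- 'none → 0' is unreachable under Pre_ (the counter is nonempty there).
def pyMostCommon1Key (c : PySem.Dict Int Int) : Int :=
  match PySem.List.max? c.items (fun p => p.2) with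
  | some p => p.1
  | none => 0

-- _bg / _color_counts both build 'c = Counter(); for row in g: c.update(row)'
def pvCountA (g : List (List Int)) : PySem.Dict Int Int :=
  g.foldl (fun c row => row.foldl (fun c x => c.modify x 0 (· + 1)) c) PySem.Dict.empty

-- 'res[r][c] = col' (A's in-place cell assignment)
def pvSetCell (res : List (List Int)) (r c : Int) (col : Int) : List (List Int) :=
  PySem.List.pySetD res r (PySem.List.pySetD (PySem.List.pyGetD res r []) c col)

def draw_border (g : List (List Int)) : List (List Int) :=
  let bg := pyMostCommon1Key (pvCountA g)                     -- bg = _bg(g)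
  let h : Int := g.length
  let w : Int := (PySem.List.pyGetD g 0 []).length           -- w = len(g[0])
  let cc := (pvCountA g).erase bg                             -- cc = _color_counts(g); del cc[bg]
  if cc.items = [] then g
  else
    let col := pyMostCommon1Key cc
    let res := g.map (fun row => PySem.List.slice row none none)   -- res = _copy(g)
    let res := (PySem.List.pyRange 0 h 1).foldl
      (fun res r => pvSetCell (pvSetCell res r 0 col) r (w - 1) col) res
    let res := (PySem.List.pyRange 0 w 1).foldl
      (fun res c => pvSetCell (pvSetCell res 0 c col) (h - 1) c col) res
    res

-- ===== PORT B =====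
-- _best(items, exclude): running argmax, first key with strictly largest count, skipping exclude
def pvBest (items : List (Int × Int)) (exclude : Option Int) : Option Int × Int :=
  items.foldl (fun s p => if some p.1 ≠ exclude ∧ s.2 < p.2 then (some p.1, p.2) else s)
    ((none : Option Int), (-1 : Int))

def draw_border_alt (g : List (List Int)) : List (List Int) :=
  let counts := g.foldl (fun d row => row.foldl
    (fun d x => d.insert x (d.getD x 0 + 1)) d) PySem.Dict.empty   -- counts[x] = counts.get(x,0)+1
  let bg := (pvBest counts.items none).1                           -- bg, _ = _best(counts.items(), None)
  if counts.size = 1 then g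
  else
    let col := (pvBest counts.items bg).1.getD 0                   -- col, _ = _best(counts.items(), bg)
                                                                   -- ('none → 0' unreachable under Pre_)
    let h : Int := g.length
    let w : Int := (PySem.List.pyGetD g 0 []).length               -- w = len(g[0])
    let top := List.replicate w.toNat col                          -- top = [col]*w
    if h = 1 then [top]
    else if w = 1 then g.map (fun _ => [col])
    else
      [top] ++
        (PySem.List.slice g (some 1) (some (-1))).map
          (fun row => [col] ++ PySem.List.slice row (some 1) (some (-1)) ++ [col]) ++
      [PySem.List.slice top none none]                             -- [top] + mid + [top[:]]

-- ===== PRECONDITION & SPEC =====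
-- Pre_ admits nonempty rectangular grids with a nonempty first row: A raises IndexError on an empty
-- grid or empty first row, and on ragged grids (rows shorter/longer than len(g[0])) A either raises
-- or paints the border only within the first len(g[0]) columns — an artefact of its index loops.
def Pre_draw_border (g : List (List Int)) : Prop :=
  g ≠ [] ∧ g.getD 0 [] ≠ [] ∧ ∀ row ∈ g, row.length = (g.getD 0 []).length
instance (g : List (List Int)) : Decidable (Pre_draw_border g) := by unfold Pre_draw_border; infer_instance

def pvWitness_draw_border : List (List Int) := [[1, 2], [3, 4]]

def Spec_draw_border (g : List (List Int)) (out : List (List Int)) : Prop := out = draw_border_alt g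
instance (g : List (List Int)) (out : List (List Int)) : Decidable (Spec_draw_border g out) := by unfold Spec_draw_border; infer_instance

-- ===== CLAIM (what is proved, stated in full; the proofs are below) =====
def Claim_equal_draw_border : Prop := ∀ (g : List (List Int)), Dom_draw_border g → Pre_draw_border g → Spec_draw_border g (draw_border g)

-- ===== LEMMAS AND PROOFS =====

-- A's two nested counting loops build exactly Counter(all cells)
lemma pvCountA_eq (g : List (List Int)) : pvCountA g = PySem.Dict.counter (g.flatMap id) := by
  rw [PySem.Dict.counter_eq_foldl, List.foldl_flatMap]
  simp [pvCountA]

-- B's nested 'counts[x] = counts.get(x, 0) + 1' loop builds the same Counter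
lemma countB_eq (g : List (List Int)) :
    g.foldl (fun d row => row.foldl (fun d x => d.insert x (d.getD x 0 + 1)) d) PySem.Dict.empty
    = PySem.Dict.counter (g.flatMap id) := by
  rw [← PySem.Dict.foldl_insert_getD_add_one_eq_counter, List.foldl_flatMap]
  simp

-- the exclusion-free running argmax continues exactly like max?'s fold
def pvBestOf (o : Option (Int × Int)) : Option Int × Int :=
  match o with
  | none => ((none : Option Int), (-1 : Int))
  | some p => (some p.1, p.2)

lemma bestAux (l : List (Int × Int)) : ∀ (q : Int × Int),
    l.foldl (fun s p => if s.2 < p.2 then (some p.1, p.2) else s) ((some q.1, q.2) : Option Int × Int)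
    = pvBestOf (PySem.List.max? (q :: l) (fun p => p.2)) := by
  induction l with
  | nil => intro q; simp [PySem.List.max?, pvBestOf]
  | cons p l ih =>
    intro q
    rw [List.foldl_cons]
    by_cases h : q.2 < p.2
    · have hmax : PySem.List.max? (q :: p :: l) (fun r => r.2)
          = PySem.List.max? (p :: l) (fun r => r.2) := by
        simp [PySem.List.max?, List.foldl_cons, h]
      rw [hmax]
      simp only [h, ite_true]
      exact ih p
    · have hmax : PySem.List.max? (q :: p :: l) (fun r => r.2)
          = PySem.List.max? (q :: l) (fun r => r.2) := by
        simp [PySem.List.max?, List.foldl_cons, h]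
      rw [hmax]
      simp only [h, ite_false]
      exact ih q

-- the running argmax with exclusion is max? of the filtered item list
lemma pvBest_eq (l : List (Int × Int)) (ex : Option Int) (hpos : ∀ p ∈ l, 0 ≤ p.2) :
    pvBest l ex
    = pvBestOf (PySem.List.max? (l.filter (fun p => decide (some p.1 ≠ ex))) (fun p => p.2)) := by
  have hstep : pvBest l ex
      = (l.filter (fun p => decide (some p.1 ≠ ex))).foldl
          (fun s p => if s.2 < p.2 then (some p.1, p.2) else s) (none, -1) := by
    rw [List.foldl_filter]
    unfold pvBest
    congr 1
    funext s p
    by_cases h : some p.1 = ex <;> by_cases h2 : s.2 < p.2 <;> simp [h, h2]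
  rw [hstep]
  have hposf : ∀ p ∈ l.filter (fun p => decide (some p.1 ≠ ex)), 0 ≤ p.2 := by
    intro p hp; exact hpos p (List.mem_of_mem_filter hp)
  generalize l.filter (fun p => decide (some p.1 ≠ ex)) = lf at hposf ⊢
  cases lf with
  | nil => simp [PySem.List.max?, pvBestOf]
  | cons p t =>
    rw [List.foldl_cons]
    have h0 : (-1 : Int) < p.2 := by
      have := hposf p (List.mem_cons_self)
      omega
    simp only [h0, ite_true]
    exact bestAux t p

-- all counts in a counter are nonnegative
lemma counter_items_nonneg (xs : List Int) :
    ∀ p ∈ (PySem.Dict.counter xs).items, 0 ≤ p.2 := by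
  intro p hp
  rw [PySem.Dict.items_counter] at hp
  obtain ⟨k, _, rfl⟩ := List.mem_map.mp hp
  positivity

-- res[r][c] = col at valid nonnegative indices is List.set
lemma pvSetCell_eq (res : List (List Int)) (r c : Int) (col : Int) (hr : 0 ≤ r) (hc : 0 ≤ c) :
    pvSetCell res r c col = res.set r.toNat ((res.getD r.toNat []).set c.toNat col) := by
  unfold pvSetCell
  rw [PySem.List.pyGetD_of_nonneg _ _ hr, PySem.List.pySetD_of_nonneg _ _ hc,
      PySem.List.pySetD_of_nonneg _ _ hr]

-- A's row loop 'for r in range(h): res[r][0]=col; res[r][w-1]=col' maps each row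
lemma loop1_eq (col : Int) (w0 n : Nat) (hw : 1 ≤ w0) :
    ∀ (k a : Nat) (res : List (List Int)), n - a ≤ k → res.length = n →
      (∀ row ∈ res, row.length = w0) →
      (PySem.List.pyRange (a : Int) (n : Int) 1).foldl
        (fun res r => pvSetCell (pvSetCell res r 0 col) r ((w0 : Int) - 1) col) res
      = res.take a ++ (res.drop a).map (fun row => (row.set 0 col).set (w0 - 1) col) := by
  intro k
  induction k with
  | zero =>
    intro a res hk hlen hrow
    rw [PySem.List.pyRange_one_eq_nil (by exact_mod_cast (by omega : n ≤ a))]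
    have hla : res.length ≤ a := by omega
    simp [List.take_of_length_le hla, List.drop_eq_nil_of_le hla]
  | succ k ih =>
    intro a res hk hlen hrow
    by_cases han : a < n
    · rw [PySem.List.pyRange_one_cons (by exact_mod_cast han), List.foldl_cons]
      have har : a < res.length := by omega
      have hget : res.getD a [] = res[a] := List.getD_eq_getElem res [] har
      have hc1 : (0 : Int) ≤ (w0 : Int) - 1 := by omega
      have htn : ((w0 : Int) - 1).toNat = w0 - 1 := by omega
      rw [pvSetCell_eq res (a : Int) 0 col (by positivity) (by norm_num),
          pvSetCell_eq _ (a : Int) ((w0 : Int) - 1) col (by positivity) hc1]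
      simp only [Int.toNat_natCast, Int.toNat_zero, htn, hget]
      have hgd : ((res.set a (res[a].set 0 col)).getD a []) = res[a].set 0 col := by
        rw [List.getD_eq_getElem _ _ (by simpa using har)]
        simp [List.getElem_set_self]
      rw [hgd, List.set_set]
      have hcast : ((a : Int) + 1) = (((a + 1 : Nat)) : Int) := by push_cast; ring
      rw [hcast, ih (a + 1) _ (by omega) (by simpa using hlen)]
      · -- re-assemble take/drop around the set cell
        have hset : res.set a ((res[a].set 0 col).set (w0 - 1) col)
            = res.take a ++ ((res[a].set 0 col).set (w0 - 1) col) :: res.drop (a + 1) := by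
          rw [List.set_eq_take_append_cons_drop]; simp [har]
        have hlt : (res.take a).length = a := by simp [Nat.min_eq_left (le_of_lt har)]
        have hsub : a + 1 - a = 1 := by omega
        have h1 : List.take (a + 1) (res.set a ((res[a].set 0 col).set (w0 - 1) col))
            = res.take a ++ [(res[a].set 0 col).set (w0 - 1) col] := by
          rw [hset, List.take_append, hlt, hsub,
              List.take_of_length_le (by omega : (res.take a).length ≤ a + 1)]
          simp
        have h2 : List.drop (a + 1) (res.set a ((res[a].set 0 col).set (w0 - 1) col))
            = res.drop (a + 1) := by
          rw [hset, List.drop_append, hlt, hsub,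
              List.drop_eq_nil_of_le (by omega : (res.take a).length ≤ a + 1)]
          simp
        rw [h1, h2, List.drop_eq_getElem_cons har, List.map_cons]
        simp
      · intro row hmem
        rcases List.mem_or_eq_of_mem_set hmem with h | h
        · exact hrow row h
        · subst h; simp [hrow res[a] (List.getElem_mem har)]
    · rw [PySem.List.pyRange_one_eq_nil (by exact_mod_cast (by omega : n ≤ a))]
      have hla : res.length ≤ a := by omega
      simp [List.take_of_length_le hla, List.drop_eq_nil_of_le hla]

-- one border-painting step extends the painted suffix by one cell
lemma fill_step (row : List Int) (col : Int) (w0 a : Nat) (hrow : row.length = w0) (ha : a < w0) :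
    (row.set a col).take (a + 1) ++ List.replicate (w0 - (a + 1)) col
    = row.take a ++ List.replicate (w0 - a) col := by
  have har : a < row.length := by omega
  rw [List.set_eq_take_append_cons_drop]
  simp only [har, if_pos]
  rw [List.take_append]
  have hlt : (row.take a).length = a := by simp [Nat.min_eq_left (le_of_lt har)]
  rw [List.take_of_length_le (by omega : (row.take a).length ≤ a + 1), hlt]
  have h1 : a + 1 - a = 1 := by omega
  rw [h1]
  have h2 : w0 - a = (w0 - (a + 1)) + 1 := by omega
  rw [h2, List.replicate_succ]
  simp

-- A's column loop 'for c in range(w): res[0][c]=col; res[h-1][c]=col' fills both border rows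
lemma loop2_eq (col : Int) (w0 n : Nat) (hn : 1 ≤ n) :
    ∀ (k a : Nat) (res : List (List Int)), w0 - a ≤ k → res.length = n →
      (∀ row ∈ res, row.length = w0) →
      (PySem.List.pyRange (a : Int) (w0 : Int) 1).foldl
        (fun res c => pvSetCell (pvSetCell res 0 c col) ((n : Int) - 1) c col) res
      = (res.set 0 ((res.getD 0 []).take a ++ List.replicate (w0 - a) col)).set (n - 1)
          ((res.getD (n - 1) []).take a ++ List.replicate (w0 - a) col) := by
  intro k
  induction k with
  | zero =>
    intro a res hk hlen hrow
    rw [PySem.List.pyRange_one_eq_nil (by exact_mod_cast (by omega : w0 ≤ a))]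
    have h0 : 0 < res.length := by omega
    have hn1 : n - 1 < res.length := by omega
    have e0 : res.getD 0 [] = res[0] := List.getD_eq_getElem res [] h0
    have e1 : res.getD (n - 1) [] = res[n - 1] := List.getD_eq_getElem res [] hn1
    have l0 : res[0].length = w0 := hrow _ (List.getElem_mem h0)
    have l1 : res[n - 1].length = w0 := hrow _ (List.getElem_mem hn1)
    rw [e0, e1]
    rw [List.take_of_length_le (by omega), List.take_of_length_le (by omega)]
    simp [show w0 - a = 0 by omega, List.set_getElem_self]
  | succ k ih =>
    intro a res hk hlen hrow
    by_cases haw : a < w0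
    · rw [PySem.List.pyRange_one_cons (by exact_mod_cast haw), List.foldl_cons]
      have h0 : 0 < res.length := by omega
      have hn1 : n - 1 < res.length := by omega
      have e0 : res.getD 0 [] = res[0] := List.getD_eq_getElem res [] h0
      have e1 : res.getD (n - 1) [] = res[n - 1] := List.getD_eq_getElem res [] hn1
      have l0 : res[0].length = w0 := hrow _ (List.getElem_mem h0)
      have l1 : res[n - 1].length = w0 := hrow _ (List.getElem_mem hn1)
      have hnn : ((n : Int) - 1).toNat = n - 1 := by omega
      rw [pvSetCell_eq res 0 (a : Int) col (by norm_num) (by positivity),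
          pvSetCell_eq _ ((n : Int) - 1) (a : Int) col (by omega) (by positivity)]
      simp only [Int.toNat_natCast, Int.toNat_zero, hnn, e0]
      have hcast : ((a : Int) + 1) = (((a + 1 : Nat)) : Int) := by push_cast; ring
      by_cases hone : n = 1
      · subst hone
        simp only [Nat.sub_self]
        have eg : ((res.set 0 (res[0].set a col)).getD 0 []) = res[0].set a col := by
          rw [List.getD_eq_getElem _ _ (by simpa using h0)]
          simp [List.getElem_set_self]
        rw [eg, List.set_set, List.set_set]
        rw [hcast, ih (a + 1) _ (by omega) (by simpa using hlen)
            (by intro row hmem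
                rcases List.mem_or_eq_of_mem_set hmem with h | h
                · exact hrow row h
                · subst h; simp [l0])]
        have eg2 : ((res.set 0 (res[0].set a col)).getD 0 []) = res[0].set a col := eg
        simp only [Nat.sub_self, eg2, List.set_set]
        rw [fill_step res[0] col w0 a l0 haw, e0]
      · have hne01 : (0 : Nat) ≠ n - 1 := by omega
        have eg1 : ((res.set 0 (res[0].set a col)).getD (n - 1) []) = res[n - 1] := by
          rw [List.getD_eq_getElem _ _ (by simpa using hn1)]
          rw [List.getElem_set_ne (by omega)]
        rw [eg1]
        rw [hcast, ih (a + 1) _ (by omega) (by simpa using hlen)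
            (by intro row hmem
                rcases List.mem_or_eq_of_mem_set hmem with h | h
                · rcases List.mem_or_eq_of_mem_set h with h' | h'
                  · exact hrow row h'
                  · subst h'; simp [l0]
                · subst h; simp [l1])]
        have eg2 : (((res.set 0 (res[0].set a col)).set (n - 1) (res[n - 1].set a col)).getD 0 [])
            = res[0].set a col := by
          rw [List.getD_eq_getElem _ _ (by simpa using h0)]
          rw [List.getElem_set_ne (by omega), List.getElem_set_self]
        have eg3 : (((res.set 0 (res[0].set a col)).set (n - 1) (res[n - 1].set a col)).getD (n - 1) [])
            = res[n - 1].set a col := by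
          rw [List.getD_eq_getElem _ _ (by simpa using hn1)]
          simp [List.getElem_set_self]
        rw [eg2, eg3]
        rw [List.set_comm _ _ (by omega : (n - 1 : Nat) ≠ 0), List.set_set]
        rw [fill_step res[0] col w0 a l0 haw, fill_step res[n - 1] col w0 a l1 haw, e1,
            List.set_set]
    · rw [PySem.List.pyRange_one_eq_nil (by exact_mod_cast (by omega : w0 ≤ a))]
      have h0 : 0 < res.length := by omega
      have hn1 : n - 1 < res.length := by omega
      rw [List.getD_eq_getElem res [] h0, List.getD_eq_getElem res [] hn1]
      rw [List.take_of_length_le (by rw [hrow _ (List.getElem_mem h0)]; omega),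
          List.take_of_length_le (by rw [hrow _ (List.getElem_mem hn1)]; omega)]
      simp [show w0 - a = 0 by omega, List.set_getElem_self]

-- xs[1:-1] is drop 1 then take (len-2)
lemma slice_one_negone {α : Type} (xs : List α) (h : 1 ≤ xs.length) :
    PySem.List.slice xs (some 1) (some (-1)) = (xs.drop 1).take (xs.length - 2) := by
  unfold PySem.List.slice PySem.List.clampIdx
  norm_num
  rcases xs with _ | ⟨y, ys⟩
  · simp at h
  · simp

-- painting both edge cells of a row of width w0 ≥ 2 is the col-sandwich of its interior
lemma row_sandwich (row : List Int) (col : Int) (w0 : Nat) (hw : 2 ≤ w0)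
    (hlen : row.length = w0) :
    (row.set 0 col).set (w0 - 1) col = col :: ((row.drop 1).take (w0 - 2) ++ [col]) := by
  cases row with
  | nil => simp at hlen; omega
  | cons a rest =>
    have hr : rest.length = w0 - 1 := by simp at hlen; omega
    have hsub : w0 - 1 = (w0 - 2) + 1 := by omega
    rw [List.set_cons_zero, hsub, List.set_cons_succ]
    simp only [List.drop_succ_cons, List.drop_zero]
    congr 1
    rw [List.set_eq_take_append_cons_drop]
    have h2 : w0 - 2 < rest.length := by omega
    simp [h2, List.drop_eq_nil_of_le (by omega : rest.length ≤ w0 - 2 + 1)]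

-- 'del cc[bg]' leaves an empty counter exactly when the counter had the single key bg
lemma guard_iff (L : List (Int × Int)) (m : Int × Int)
    (hm : PySem.List.max? L (fun p => p.2) = some m)
    (hnodup : (L.map Prod.fst).Nodup) :
    (L.filter (fun p => !(p.1 == m.1)) = []) ↔ L.length = 1 := by
  constructor
  · intro hf
    have hmem : m ∈ L := PySem.List.max?_mem hm
    have hall : ∀ p ∈ L, p.1 = m.1 := by
      intro p hp
      by_contra hnep
      have : p ∈ L.filter (fun p => !(p.1 == m.1)) :=
        List.mem_filter.mpr ⟨hp, by simp [hnep]⟩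
      simp [hf] at this
    cases L with
    | nil => simp at hmem
    | cons p t =>
      cases t with
      | nil => rfl
      | cons q t2 =>
        exfalso
        have h1 : p.1 = m.1 := hall p (by simp)
        have h2 : q.1 = m.1 := hall q (by simp)
        have hn := hnodup
        simp only [List.map_cons, List.nodup_cons, List.mem_cons] at hn
        exact hn.1 (Or.inl (by rw [h1, h2]))
  · intro hl
    obtain ⟨p, rfl⟩ : ∃ p, L = [p] := by
      cases L with
      | nil => simp at hl
      | cons p t =>
        cases t with
        | nil => exact ⟨p, rfl⟩
        | cons q t2 => simp at hl
    have hmp : m = p := by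
      simp [PySem.List.max?] at hm
      exact hm.symm
    rw [hmp]
    simp

-- ===== VERDICT =====
theorem draw_border_spec : Claim_equal_draw_border := by
  intro g _hdom hpre
  obtain ⟨hne, h0, hrect⟩ := hpre
  show draw_border g = draw_border_alt g
  unfold draw_border draw_border_alt
  simp only [pvCountA_eq, countB_eq, PySem.List.pyGetD_zero]
  have hcells : g.flatMap id ≠ [] := by
    cases g with
    | nil => exact absurd rfl hne
    | cons r0 t =>
      simp only [List.getD_cons_zero] at h0
      simp only [List.flatMap_cons, id_eq, ne_eq, List.append_eq_nil_iff, not_and]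
      intro hr0; exact absurd hr0 h0
  have hpos := counter_items_nonneg (g.flatMap id)
  have hLne : (PySem.Dict.counter (g.flatMap id)).items ≠ [] := by
    obtain ⟨x, hx⟩ := List.exists_mem_of_ne_nil _ hcells
    intro hcontr
    rw [PySem.Dict.items_counter] at hcontr
    have : x ∈ PySem.Set.ofList (g.flatMap id) := (PySem.Set.mem_ofList _ _).mpr hx
    rw [List.map_eq_nil_iff.mp hcontr] at this
    simp at this
  obtain ⟨m, hm⟩ : ∃ m, PySem.List.max? (PySem.Dict.counter (g.flatMap id)).items
      (fun p => p.2) = some m := by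
    cases hq : PySem.List.max? (PySem.Dict.counter (g.flatMap id)).items (fun p => p.2) with
    | none => exact absurd ((PySem.List.max?_eq_none_iff _ _).mp hq) hLne
    | some m => exact ⟨m, rfl⟩
  have hbgA : pyMostCommon1Key (PySem.Dict.counter (g.flatMap id)) = m.1 := by
    unfold pyMostCommon1Key
    rw [hm]
  have hbgB : pvBest (PySem.Dict.counter (g.flatMap id)).items none = (some m.1, m.2) := by
    rw [pvBest_eq _ _ hpos]
    have hpred : (fun p : Int × Int => decide (some p.1 ≠ none)) = (fun _ => true) := by
      funext p; simp
    rw [hpred, List.filter_true, hm]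
    rfl
  rw [hbgA, hbgB]
  have hnodup : ((PySem.Dict.counter (g.flatMap id)).items.map Prod.fst).Nodup := by
    have h := PySem.Dict.nodup_keys_counter (xs := g.flatMap id)
    simpa [PySem.Dict.keys] using h
  have herase : ((PySem.Dict.counter (g.flatMap id)).erase m.1).items
      = (PySem.Dict.counter (g.flatMap id)).items.filter (fun p => !(p.1 == m.1)) := rfl
  have hguard := guard_iff _ m hm hnodup
  by_cases hone : (PySem.Dict.counter (g.flatMap id)).items.length = 1
  · rw [if_pos (by rw [herase]; exact hguard.mpr hone),
        if_pos (by simpa [PySem.Dict.size] using hone)]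
  · rw [if_neg (by rw [herase]; intro hc; exact hone (hguard.mp hc)),
        if_neg (by simpa [PySem.Dict.size] using hone)]
    -- the selected border colors agree
    have hcol : (pvBest (PySem.Dict.counter (g.flatMap id)).items (some m.1)).1.getD 0
        = pyMostCommon1Key ((PySem.Dict.counter (g.flatMap id)).erase m.1) := by
      rw [pvBest_eq _ _ hpos]
      have hpred : (fun p : Int × Int => decide (some p.1 ≠ some m.1))
          = (fun p : Int × Int => !(p.1 == m.1)) := by
        funext p; by_cases h : p.1 = m.1 <;> simp [h]
      rw [hpred]
      unfold pyMostCommon1Key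
      rw [herase]
      cases hq : PySem.List.max? ((PySem.Dict.counter (g.flatMap id)).items.filter
          (fun p => !(p.1 == m.1))) (fun p => p.2) with
      | none => simp [pvBestOf]
      | some q => simp [pvBestOf]
    rw [hcol]
    generalize pyMostCommon1Key ((PySem.Dict.counter (g.flatMap id)).erase m.1) = col
    -- grid shapes
    have hn : 1 ≤ g.length := by
      cases g with
      | nil => exact absurd rfl hne
      | cons a b => simp
    have hw : 1 ≤ (g.getD 0 []).length := List.length_pos_of_ne_nil h0
    -- A's copy then two loops, in closed form
    have hcopy : g.map (fun row => PySem.List.slice row) = g := by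
      simp [PySem.List.slice_none_none]
    rw [hcopy]
    have L1 := loop1_eq col (g.getD 0 []).length g.length (by omega) g.length 0 g
      (by omega) rfl hrect
    simp only [Nat.cast_zero, List.take_zero, List.drop_zero, List.nil_append] at L1
    rw [L1]
    have L2 := loop2_eq col (g.getD 0 []).length g.length (by omega) (g.getD 0 []).length 0
      (g.map (fun row => (row.set 0 col).set ((g.getD 0 []).length - 1) col)) (by omega)
      (by simp)
      (by intro row hm2
          obtain ⟨r, hr, rfl⟩ := List.mem_map.mp hm2
          simp [hrect r hr])
    simp only [Nat.cast_zero, List.take_zero, List.nil_append, Nat.sub_zero] at L2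
    rw [L2]
    simp only [Int.toNat_natCast, PySem.List.slice_none_none]
    by_cases hn1 : g.length = 1
    · rw [if_pos (by exact_mod_cast hn1)]
      obtain ⟨r0, rfl⟩ : ∃ r0, g = [r0] := by
        cases g with
        | nil => simp at hn1
        | cons a t =>
          cases t with
          | nil => exact ⟨a, rfl⟩
          | cons b t2 => simp at hn1
      simp
    · rw [if_neg (by exact_mod_cast hn1)]
      by_cases hw1 : (g.getD 0 []).length = 1
      · rw [if_pos (by exact_mod_cast hw1)]
        have hmapc : g.map (fun row => (row.set 0 col).set ((g.getD 0 []).length - 1) col)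
            = g.map (fun _ => ([col] : List Int)) := by
          apply List.map_congr_left
          intro row hr
          obtain ⟨x, rfl⟩ : ∃ x, row = [x] :=
            List.length_eq_one_iff.mp (by rw [hrect row hr, hw1])
          rw [hw1]
          simp
        rw [hmapc, hw1]
        have hrep : g.map (fun _ => ([col] : List Int)) = List.replicate g.length [col] := by
          simp [List.map_const']
        have hsetrep : ∀ i, i < g.length →
            (List.replicate g.length ([col] : List Int)).set i [col]
            = List.replicate g.length [col] := by
          intro i hi
          apply List.ext_getElem
          · simp
          · intro j h1 h2
            simp
        rw [hrep, show List.replicate 1 col = [col] from rfl,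
            hsetrep 0 (by omega), hsetrep (g.length - 1) (by omega), ← hrep]
      · rw [if_neg (by exact_mod_cast hw1)]
        obtain ⟨r0, rest, rfl⟩ : ∃ r0 rest, g = r0 :: rest := by
          cases g with
          | nil => exact absurd rfl hne
          | cons a t => exact ⟨a, t, rfl⟩
        have hg0 : (r0 :: rest).getD 0 [] = r0 := rfl
        have hk : 1 ≤ rest.length := by
          cases rest with
          | nil => simp at hn1
          | cons a t => simp
        have hslg : PySem.List.slice (r0 :: rest) (some 1) (some (-1))
            = rest.take (rest.length - 1) := by
          rw [slice_one_negone _ (by simp)]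
          simp only [List.drop_succ_cons, List.drop_zero, List.length_cons]
          congr 1
        rw [hslg]
        simp only [List.map_cons, List.set_cons_zero, List.length_cons,
          Nat.add_sub_cancel]
        have hki : rest.length = (rest.length - 1) + 1 := by omega
        rw [hki, List.set_cons_succ, ← hki]
        rw [List.set_eq_take_append_cons_drop]
        have hlm : (rest.map (fun row => (row.set 0 col).set (((r0 :: rest).getD 0 []).length - 1) col)).length = rest.length := by simp
        rw [hlm]
        rw [if_pos (by omega : rest.length - 1 < rest.length)]
        rw [List.drop_eq_nil_of_le (by simp; omega)]
        rw [← List.map_take]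
        rw [List.singleton_append]
        congr 1
        congr 1
        apply List.map_congr_left
        intro row hr
        have hrl : row.length = ((r0 :: rest).getD 0 []).length :=
          hrect row (by exact List.mem_cons_of_mem _ (List.mem_of_mem_take hr))
        rw [row_sandwich row col _ (by omega) hrl]
        rw [slice_one_negone row (by omega)]
        rw [hrl]
        simp
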